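-- pv_equiv track=rewrite | github.com/parth0774/Text-To-SQL | Evaluation/evaluation.py | tokenize_sql
-- ===== SOURCE A (Python) =====
-- from typing import Dict, List, Tuple, Optional
--
-- def tokenize_sql(sql: str) -> List[str]:
--     tokens = []
--     current = ""
--     in_quotes = False
--     for char in sql:
--         if char == "'" or char == '"':
--             in_quotes = not in_quotes
--             current += char
--         elif char == ' ' and not in_quotes:
--             if current:
--                 tokens.append(current)
--             current = ""
--         else:
--             current += char
--     if current:
--         tokens.append(current)
--     return tokens
-- ===== SOURCE B (Python) =====
-- def tokenize_sql(sql):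
--     # pass 1: annotate each character with the quote-parity state at its position
--     ann = []
--     q = False
--     for ch in sql:
--         if ch == "'" or ch == '"':
--             q = not q
--         ann.append((ch, q))
--     # pass 2: walk backwards, starting a new segment at each outside-quote space
--     parts = [[]]
--     for ch, qq in reversed(ann):
--         if ch == ' ' and not qq:
--             parts.append([])
--         else:
--             parts[-1].append(ch)
--     return [''.join(reversed(seg)) for seg in reversed(parts) if seg]
-- ===== Notes on version B (the rewrite author's own statement) =====
-- stated objective: alternative
-- what changed: B separates quote tracking from tokenisation: a first pass annotates every character with its quote-parity state, then a second, backward pass splits the annotated list into segments at outside-quote spaces and drops empty segments, instead of A's single forward loop with a token/current accumulator.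
import Mathlib
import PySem

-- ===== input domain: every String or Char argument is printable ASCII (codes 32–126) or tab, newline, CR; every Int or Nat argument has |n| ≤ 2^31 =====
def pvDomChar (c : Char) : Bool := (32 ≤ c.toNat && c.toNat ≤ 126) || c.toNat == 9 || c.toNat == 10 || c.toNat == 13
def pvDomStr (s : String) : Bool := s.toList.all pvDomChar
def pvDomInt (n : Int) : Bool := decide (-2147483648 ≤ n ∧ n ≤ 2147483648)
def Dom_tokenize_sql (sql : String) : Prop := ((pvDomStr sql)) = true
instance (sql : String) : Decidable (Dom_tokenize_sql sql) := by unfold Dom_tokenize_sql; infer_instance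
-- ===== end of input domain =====

-- B re-decomposes A's single accumulator loop into two passes (annotate with quote
-- state, then split backwards at outside-quote spaces); same result, same O(n) cost.

-- ===== PORT A =====
-- A's forward loop: state (tokens, current, in_quotes); strings kept as List Char.
def tokA : List Char → List String → List Char → Bool → List String
  | [], toks, cur, _ => if cur ≠ [] then toks ++ [String.mk cur] else toks
  | c :: cs, toks, cur, q =>
    if c = '\'' ∨ c = '"' then tokA cs toks (cur ++ [c]) (!q)
    else if c = ' ' ∧ q = false then
      tokA cs (if cur ≠ [] then toks ++ [String.mk cur] else toks) [] q
    else tokA cs toks (cur ++ [c]) q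

def tokenize_sql (sql : String) : List String := tokA sql.toList [] [] false

-- ===== PORT B =====
-- pass 1 of Source B: each character paired with the quote-parity state after it.
def annot : List Char → Bool → List (Char × Bool)
  | [], _ => []
  | c :: cs, q =>
    let q' := if c = '\'' ∨ c = '"' then !q else q
    (c, q') :: annot cs q'

-- pass 2 of Source B: the backward loop over `reversed(ann)`; acc's head is python's
-- `parts[-1]`, with each segment built front-most-recent (python appends then reverses).
def splitRevAux : List (Char × Bool) → List (List Char) → List (List Char)
  | [], acc => acc
  | (c, qq) :: rest, acc =>
    splitRevAux rest (if c = ' ' ∧ qq = false then [] :: acc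
                      else (c :: acc.headI) :: acc.tail)

def tokenize_sql_alt (sql : String) : List String :=
  let ann := annot sql.toList false
  let parts := splitRevAux ann.reverse [[]]
  (parts.filter (fun s => s ≠ [])).map (fun s => String.mk s)

-- ===== PRECONDITION & SPEC =====
def Spec_tokenize_sql (sql : String) (out : List String) : Prop := out = tokenize_sql_alt sql
instance (sql : String) (out : List String) : Decidable (Spec_tokenize_sql sql out) := by unfold Spec_tokenize_sql; infer_instance

-- ===== CLAIM (what is proved, stated in full; the proofs are below) =====
def Claim_equal_tokenize_sql : Prop := ∀ (sql : String), Dom_tokenize_sql sql → Spec_tokenize_sql sql (tokenize_sql sql)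

-- ===== LEMMAS AND PROOFS =====

-- the backward loop expressed as a front-to-back structural recursion
def splitAnn : List (Char × Bool) → List (List Char)
  | [] => [[]]
  | (c, q) :: rest =>
    if c = ' ' ∧ q = false then [] :: splitAnn rest
    else (c :: (splitAnn rest).headI) :: (splitAnn rest).tail

def pvF (l : List (List Char)) : List String :=
  (l.filter (fun s => s ≠ [])).map (fun s => String.mk s)

theorem splitAnn_ne_nil (l : List (Char × Bool)) : splitAnn l ≠ [] := by
  cases l with
  | nil => simp [splitAnn]
  | cons x rest =>
    obtain ⟨c, q⟩ := x
    simp only [splitAnn]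
    split <;> simp

theorem splitRevAux_append (l m : List (Char × Bool)) (acc : List (List Char)) :
    splitRevAux (l ++ m) acc = splitRevAux m (splitRevAux l acc) := by
  induction l generalizing acc with
  | nil => simp [splitRevAux]
  | cons x rest ih =>
    obtain ⟨c, q⟩ := x
    simp only [List.cons_append, splitRevAux]
    exact ih _

theorem splitRevAux_reverse (l : List (Char × Bool)) :
    splitRevAux l.reverse [[]] = splitAnn l := by
  induction l with
  | nil => simp [splitRevAux, splitAnn]
  | cons x rest ih =>
    obtain ⟨c, q⟩ := x
    simp only [List.reverse_cons, splitRevAux_append, ih, splitAnn, splitRevAux]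

theorem headI_cons_tail {α : Type} [Inhabited α] (l : List α) (h : l ≠ []) :
    l.headI :: l.tail = l := by
  cases l with
  | nil => exact absurd rfl h
  | cons a t => rfl

theorem pvF_cons (s : List Char) (l : List (List Char)) :
    pvF (s :: l) = if s ≠ [] then String.mk s :: pvF l else pvF l := by
  simp only [pvF, List.filter_cons]
  split <;> simp_all

-- main invariant: A's loop state (toks, cur, q) against B's split of the annotated tail
theorem tokA_eq (cs : List Char) :
    ∀ (q : Bool) (toks : List String) (cur : List Char),
    tokA cs toks cur q
      = toks ++ pvF ((cur ++ (splitAnn (annot cs q)).headI) :: (splitAnn (annot cs q)).tail) := by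
  induction cs with
  | nil =>
    intro q toks cur
    simp only [tokA, annot, splitAnn, List.headI, List.tail, List.append_nil]
    rw [pvF_cons]
    split <;> simp [pvF]
  | cons c cs ih =>
    intro q toks cur
    by_cases hq : c = '\'' ∨ c = '"'
    · have hcs : ¬ (c = ' ') := by
        rcases hq with h | h <;> subst h <;> decide
      simp only [tokA, annot, if_pos hq, splitAnn]
      rw [if_neg (by simp [hcs])]
      rw [ih (!q) toks (cur ++ [c])]
      simp
    · by_cases hsp : c = ' ' ∧ q = false
      · simp only [tokA, annot, if_neg hq, if_pos hsp, splitAnn]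
        rw [ih q _ []]
        rw [List.nil_append, headI_cons_tail _ (splitAnn_ne_nil _), pvF_cons]
        by_cases hcur : cur = [] <;> simp [hcur]
      · simp only [tokA, annot, if_neg hq, if_neg hsp, splitAnn]
        rw [ih q toks (cur ++ [c])]
        simp

-- ===== VERDICT (by name: the statement is the Claim_ definition above) =====
theorem tokenize_sql_spec : Claim_equal_tokenize_sql := by
  intro sql _
  unfold Spec_tokenize_sql tokenize_sql
  show tokA sql.toList [] [] false
      = pvF (splitRevAux (annot sql.toList false).reverse [[]])
  rw [splitRevAux_reverse, tokA_eq, List.nil_append, List.nil_append,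
      headI_cons_tail _ (splitAnn_ne_nil _)]
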